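-- pv_equiv track=rewrite | github.com/Jihoon0309/Programmers | Level_1/문자열_나누기.py | solution
-- ===== SOURCE A (Python) =====
-- def solution(s):
--     result=0
--
--     while len(s)!=0:
--         word_1=0
--         word_2=0
--         word=s[0]
--         while True:
--             if s[0]==word:
--                 word_1+=1
--             else:
--                 word_2+=1
--             s=s[1:]
--             if word_1==word_2 or len(s)==0:
--                 result+=1
--                 break
--     return result
-- ===== SOURCE B (Python) =====
-- def solution(s):
--     result = 0
--     same = diff = 0
--     lead = ''
--     for c in s:
--         if same == 0:
--             lead = c
--         if c == lead:
--             same += 1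
--         else:
--             diff += 1
--         if same == diff:
--             result += 1
--             same = diff = 0
--     if same != diff:
--         result += 1
--     return result
-- ===== Notes on version B (the rewrite author's own statement) =====
-- stated objective: faster
-- what changed: Replaces the nested while loops with repeated string slicing s=s[1:] (quadratic copying) by a single linear pass over the characters maintaining same/diff counters and a pending-segment flag.
import Mathlib
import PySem

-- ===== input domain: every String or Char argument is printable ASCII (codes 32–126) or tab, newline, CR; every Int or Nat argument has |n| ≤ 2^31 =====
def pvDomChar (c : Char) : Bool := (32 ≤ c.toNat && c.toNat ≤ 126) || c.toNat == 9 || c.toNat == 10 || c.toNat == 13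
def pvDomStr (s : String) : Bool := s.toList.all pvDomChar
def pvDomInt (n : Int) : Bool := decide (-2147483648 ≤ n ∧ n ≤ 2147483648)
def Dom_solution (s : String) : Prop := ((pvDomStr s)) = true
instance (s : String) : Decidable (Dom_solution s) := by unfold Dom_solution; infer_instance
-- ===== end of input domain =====

-- B replaces A's nested while loops over repeatedly sliced strings by one linear
-- fold with counters (objective: faster, asymptotic O(n) vs O(n^2)).

-- ===== PORT A =====
-- inner 'while True' loop of A: consumes chars from s, counting word_1/word_2,
-- returns the remaining string after the break. The [] case is unreachable
-- (the outer loop guard ensures s is nonempty; the loop consumes then tests).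
def solInner : List Char → Int → Int → Char → List Char
  | [], _, _, _ => []
  | c :: rest, w1, w2, word =>
    let w1' := if c = word then w1 + 1 else w1
    let w2' := if c = word then w2 else w2 + 1
    -- "if word_1==word_2 or len(s)==0: result+=1; break" (s is rest here)
    if w1' = w2' ∨ rest = [] then rest
    else solInner rest w1' w2' word

-- solInner returns a (strict inside a cons) suffix: needed for outer termination
theorem solInner_len_le : ∀ (s : List Char) (w1 w2 : Int) (word : Char),
    (solInner s w1 w2 word).length ≤ s.length := by
  intro s
  induction s with
  | nil => intro _ _ _; simp [solInner]
  | cons c rest ih =>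
    intro w1 w2 word
    simp only [solInner]
    split_ifs <;> first
      | exact le_trans (ih _ _ _) (Nat.le_succ _)
      | simp

-- outer 'while len(s)!=0' loop of A (result accumulated as 1 + …)
def solOuter : List Char → Int
  | [] => 0
  | c :: rest => 1 + solOuter (solInner (c :: rest) 0 0 c)
termination_by s => s.length
decreasing_by
  simp only [solInner]
  split_ifs <;> first
    | exact Nat.lt_succ_of_le (solInner_len_le _ _ _ _)
    | simp

def solution (s : String) : Int := solOuter s.toList

-- ===== PORT B =====
-- one step of B's for-loop; state = (result, same, diff, lead)
def stepB (st : Int × Int × Int × Char) (c : Char) : Int × Int × Int × Char :=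
  let lead := if st.2.1 = 0 then c else st.2.2.2
  let same := if c = lead then st.2.1 + 1 else st.2.1
  let diff := if c = lead then st.2.2.1 else st.2.2.1 + 1
  if same = diff then (st.1 + 1, 0, 0, lead) else (st.1, same, diff, lead)

-- B's final 'if same != diff: result += 1'
def finB (st : Int × Int × Int × Char) : Int :=
  if st.2.1 ≠ st.2.2.1 then st.1 + 1 else st.1

def solution_alt (s : String) : Int := finB (s.toList.foldl stepB (0, 0, 0, ' '))

-- ===== PRECONDITION & SPEC =====
def Spec_solution (s : String) (out : Int) : Prop := out = solution_alt s
instance (s : String) (out : Int) : Decidable (Spec_solution s out) := by unfold Spec_solution; infer_instance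

-- ===== CLAIM (what is proved, stated in full; the proofs are below) =====
def Claim_equal_solution : Prop := ∀ (s : String), Dom_solution s → Spec_solution s (solution s)

-- ===== LEMMAS AND PROOFS =====

-- inside a segment (same ≥ 1, same ≠ diff) B's fold tracks A's inner loop:
-- its final result equals restarting the fold after the segment A's inner consumes
theorem segB : ∀ (s : List Char) (w1 w2 : Int) (word : Char) (r : Int),
    1 ≤ w1 → w1 ≠ w2 →
    finB (s.foldl stepB (r, w1, w2, word))
      = finB ((solInner s w1 w2 word).foldl stepB (r + 1, 0, 0, word)) := by
  intro s
  induction s with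
  | nil =>
    intro w1 w2 word r h1 h2
    simp [solInner, finB, h2]
  | cons c rest ih =>
    intro w1 w2 word r h1 h2
    have hw1 : ¬ w1 = 0 := by omega
    by_cases hc : c = word
    · have e1 : stepB (r, w1, w2, word) c
          = if w1 + 1 = w2 then (r + 1, 0, 0, word) else (r, w1 + 1, w2, word) := by
        simp [stepB, hw1, hc]
      have e2 : solInner (c :: rest) w1 w2 word
          = if w1 + 1 = w2 ∨ rest = [] then rest else solInner rest (w1 + 1) w2 word := by
        simp [solInner, hc]
      rw [List.foldl_cons, e1, e2]
      by_cases hbal : w1 + 1 = w2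
      · simp [hbal]
      · by_cases hrest : rest = []
        · subst hrest; simp [hbal, finB, List.foldl]
        · simp only [hbal, hrest, or_self, if_false]
          exact ih (w1 + 1) w2 word r (by omega) hbal
    · have e1 : stepB (r, w1, w2, word) c
          = if w1 = w2 + 1 then (r + 1, 0, 0, word) else (r, w1, w2 + 1, word) := by
        simp [stepB, hw1, hc]
      have e2 : solInner (c :: rest) w1 w2 word
          = if w1 = w2 + 1 ∨ rest = [] then rest else solInner rest w1 (w2 + 1) word := by
        simp [solInner, hc]
      rw [List.foldl_cons, e1, e2]
      by_cases hbal : w1 = w2 + 1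
      · simp [hbal]
      · by_cases hrest : rest = []
        · subst hrest; simp [hbal, finB, List.foldl]
        · simp only [hbal, hrest, or_self, if_false]
          exact ih w1 (w2 + 1) word r h1 hbal

-- main correspondence: B's fold from a fresh state computes r + A's outer loop
theorem mainEq : ∀ (n : Nat) (s : List Char), s.length ≤ n → ∀ (r : Int) (d : Char),
    finB (s.foldl stepB (r, 0, 0, d)) = r + solOuter s := by
  intro n
  induction n with
  | zero =>
    intro s hs r d
    have : s = [] := List.eq_nil_of_length_eq_zero (Nat.le_zero.mp hs)
    subst this
    simp [finB, solOuter]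
  | succ n ih =>
    intro s hs r d
    cases s with
    | nil => simp [finB, solOuter]
    | cons c rest =>
      have hstep : stepB (r, 0, 0, d) c = (r, 1, 0, c) := by
        simp [stepB]
      rw [List.foldl_cons, hstep]
      have hseg := segB rest 1 0 c r (le_refl 1) (by omega)
      rw [hseg]
      have hinner : solInner (c :: rest) 0 0 c = solInner rest 1 0 c := by
        by_cases hrest : rest = []
        · subst hrest; simp [solInner]
        · simp [solInner, hrest]
      have hlen : (solInner rest 1 0 c).length ≤ n := by
        have := solInner_len_le rest 1 0 c
        simp at hs
        omega
      rw [ih _ hlen (r + 1) c]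
      have : solOuter (c :: rest) = 1 + solOuter (solInner (c :: rest) 0 0 c) := by
        simp [solOuter]
      rw [this, hinner]
      ring

-- ===== VERDICT (by name: the statement is the Claim_ definition above) =====
theorem solution_spec : Claim_equal_solution := by
  intro s _
  unfold Spec_solution solution solution_alt
  rw [mainEq s.toList.length s.toList (le_refl _) 0 ' ']
  simp
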